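-- pv_equiv track=rewrite | github.com/xiangzz159/Python-Study | leetcode/easy/Rotated_Digits.py | check
-- ===== SOURCE A (Python) =====
-- def check(n):
--     num = n
--     after_num = 0
--     num_list1 = [2, 5, 6, 9]
--     num_list2 = [0, 1, 8]
--     z = {
--         0: 0,
--         1: 1,
--         2: 5,
--         5: 2,
--         6: 9,
--         8: 8,
--         9: 6
--     }
--     for i in list(str(n)):
--         a = int(i)
--         if a in num_list1 + num_list2:
--             after_num = after_num * 10 + z[a]
--         else:
--             return False
--     return False if after_num == n else True
-- ===== SOURCE B (Python) =====
-- def check(n):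
--     digits = [int(c) for c in str(n)]
--     if any(d in (3, 4, 7) for d in digits):
--         return False
--     return any(d in (2, 5, 6, 9) for d in digits)
-- ===== Notes on version B (the rewrite author's own statement) =====
-- stated objective: idiomatic
-- what changed: A reconstructs the rotated number digit-by-digit with an accumulator and a rotation dict, then compares it with n; B never builds a rotated number: it maps str(n) to a digit list and answers with two set-membership scans (no invalid digit 3/4/7, and at least one self-changing digit 2/5/6/9).
import Mathlib
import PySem

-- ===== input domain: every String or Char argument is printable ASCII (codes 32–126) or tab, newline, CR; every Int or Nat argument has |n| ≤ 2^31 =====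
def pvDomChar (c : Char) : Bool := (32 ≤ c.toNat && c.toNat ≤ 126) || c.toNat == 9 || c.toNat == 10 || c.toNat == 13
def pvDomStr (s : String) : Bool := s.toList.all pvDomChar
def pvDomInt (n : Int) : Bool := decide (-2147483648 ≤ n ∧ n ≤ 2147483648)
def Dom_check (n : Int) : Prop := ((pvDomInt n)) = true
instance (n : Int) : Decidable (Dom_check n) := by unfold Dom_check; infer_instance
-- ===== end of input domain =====

-- B replaces A's rotated-number reconstruction and `after_num != n` comparison by two
-- set-membership scans over the digit list (objective: simpler/idiomatic; no accumulator).

-- ===== PORT A =====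
-- the dict z of A
def zDict : PySem.Dict Int Int :=
  ((((((PySem.Dict.empty.insert 0 0).insert 1 1).insert 2 5).insert 5 2).insert 6 9).insert 8 8).insert 9 6

-- the for-loop of A, carrying after_num; early `return False` stops the recursion.
-- int(i): `(PySem.Int.ofStr? …).getD 0` — on a non-digit char Python raises ValueError
-- (only reachable for n < 0, excluded by Pre_check); z[a] is always present when looked up.
def checkLoop (n : Int) : List Char → Int → Bool
  | [], after_num => if after_num == n then false else true
  | i :: rest, after_num =>
      let a : Int := (PySem.Int.ofStr? (String.ofList [i])).getD 0
      if (([2, 5, 6, 9] : List Int) ++ ([0, 1, 8] : List Int)).contains a then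
        checkLoop n rest (after_num * 10 + (zDict.get? a).getD 0)
      else false

def check (n : Int) : Bool := checkLoop n (PySem.Int.toStr n).toList 0

-- ===== PORT B =====
-- int(c) over str(n), then two membership scans.  Same ValueError remark as in A's port.
def check_alt (n : Int) : Bool :=
  let digits : List Int :=
    (PySem.Int.toStr n).toList.map (fun c => (PySem.Int.ofStr? (String.ofList [c])).getD 0)
  if digits.any (fun d => d == 3 || d == 4 || d == 7) then false
  else digits.any (fun d => d == 2 || d == 5 || d == 6 || d == 9)

-- ===== PRECONDITION & SPEC =====
-- A raises ValueError on every negative n (int('-')); Pre_ keeps exactly the inputs where A returns.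
def Pre_check (n : Int) : Prop := 0 ≤ n
instance (n : Int) : Decidable (Pre_check n) := by unfold Pre_check; infer_instance

def pvWitness_check : Int := 25

def Spec_check (n : Int) (out : Bool) : Prop := out = check_alt n
instance (n : Int) (out : Bool) : Decidable (Spec_check n out) := by unfold Spec_check; infer_instance

-- ===== CLAIM (what is proved, stated in full; the proofs are below) =====
def Claim_equal_check : Prop := ∀ (n : Int), Dom_check n → Pre_check n → Spec_check n (check n)

-- ===== LEMMAS AND PROOFS =====

-- decimal digits of a natural number, most significant first (proof-only helper)
def natDigits (m : Nat) : List Nat :=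
  if _h : m < 10 then [m] else natDigits (m / 10) ++ [m % 10]
decreasing_by exact Nat.div_lt_self (by omega) (by omega)

theorem natDigits_le (m : Nat) : ∀ d ∈ natDigits m, d ≤ 9 := by
  induction m using Nat.strong_induction_on with
  | _ m ih =>
    rw [natDigits]
    split
    · intro d hd; simp at hd; omega
    · intro d hd
      rcases List.mem_append.1 hd with h | h
      · exact ih _ (Nat.div_lt_self (by omega) (by omega)) _ h
      · simp at h; omega


theorem toDigitsCore_eq (m : Nat) : ∀ (f : Nat) (acc : List Char), m < f →
    Nat.toDigitsCore 10 f m acc = (natDigits m).map Nat.digitChar ++ acc := by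
  induction m using Nat.strong_induction_on with
  | _ m ih =>
    intro f acc hf
    match f with
    | 0 => omega
    | f + 1 =>
      rw [Nat.toDigitsCore, natDigits]
      by_cases h : m / 10 = 0
      · have : m < 10 := by omega
        simp [h, this, Nat.mod_eq_of_lt this]
      · have hm10 : ¬ m < 10 := by omega
        have hlt : m / 10 < m := Nat.div_lt_self (by omega) (by omega)
        simp only [h, dif_neg hm10]
        rw [ih _ hlt _ _ (by omega)]
        simp

theorem toChars_nonneg (n : Int) (h : 0 ≤ n) :
    (PySem.Int.toStr n).toList = (natDigits n.toNat).map Nat.digitChar := by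
  rw [PySem.Int.toList_toStr, PySem.Int.toChars]
  rw [if_neg (by omega), Nat.toDigits]
  simpa using toDigitsCore_eq n.toNat (n.toNat + 1) [] (by omega)

theorem ofStr_digitChar (d : Nat) (hd : d ≤ 9) :
    PySem.Int.ofStr? (String.ofList [Nat.digitChar d]) = some (d : Int) := by
  interval_cases d <;> decide

-- z as a function on digit values
def zval (d : Nat) : Int := (zDict.get? (d : Int)).getD 0

-- folds over digit lists used in the characterisation of A
def foldZ (a : Int) (ds : List Nat) : Int := ds.foldl (fun acc d => acc * 10 + zval d) a
def foldId (a : Int) (ds : List Nat) : Int := ds.foldl (fun acc d => acc * 10 + (d : Int)) a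

theorem foldZ_cons (a : Int) (d : Nat) (ds : List Nat) :
    foldZ a (d :: ds) = foldZ (a * 10 + zval d) ds := rfl
theorem foldId_cons (a : Int) (d : Nat) (ds : List Nat) :
    foldId a (d :: ds) = foldId (a * 10 + (d : Int)) ds := rfl
theorem foldId_append (a : Int) (ds es : List Nat) :
    foldId a (ds ++ es) = foldId (foldId a ds) es := by simp [foldId]

theorem natDigits_foldId (m : Nat) (a : Int) :
    foldId a (natDigits m) = a * 10 ^ (natDigits m).length + m := by
  induction m using Nat.strong_induction_on generalizing a with
  | _ m ih =>
    rw [natDigits]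
    split
    · simp [foldId]
    · rw [foldId_append, ih _ (Nat.div_lt_self (by omega) (by omega))]
      have hm : m % 10 < 10 := Nat.mod_lt _ (by omega)
      rw [show foldId (a * 10 ^ (natDigits (m / 10)).length + ↑(m / 10)) [m % 10]
            = (a * 10 ^ (natDigits (m / 10)).length + ↑(m / 10)) * 10 + ↑(m % 10) from rfl]
      simp only [List.length_append, List.length_singleton]
      have := Nat.div_add_mod m 10
      push_cast
      ring_nf
      omega

-- good digit: not 3, 4, 7
def goodD (d : Nat) : Prop := d ≠ 3 ∧ d ≠ 4 ∧ d ≠ 7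

theorem zval_bounds (d : Nat) (hd : d ≤ 9) (hg : goodD d) : 0 ≤ zval d ∧ zval d ≤ 9 := by
  obtain ⟨h3, h4, h7⟩ := hg
  interval_cases d <;> first | (exact absurd rfl (by assumption)) | decide

theorem foldZ_ne (ds : List Nat) (hds : ∀ d ∈ ds, d ≤ 9 ∧ goodD d) :
    ∀ a b : Int, a ≠ b → foldZ a ds ≠ foldId b ds := by
  induction ds with
  | nil => intro a b hab; simpa [foldZ, foldId] using hab
  | cons d rest ih =>
    intro a b hab
    obtain ⟨hd9, hdg⟩ := hds d (by simp)
    obtain ⟨hz0, hz9⟩ := zval_bounds d hd9 hdg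
    have hd9' : (d : Int) ≤ 9 := by exact_mod_cast hd9
    have hd0' : (0 : Int) ≤ (d : Int) := by positivity
    rw [foldZ_cons, foldId_cons]
    refine ih (fun x hx => hds x (by simp [hx])) _ _ ?_
    omega

theorem foldZ_eq_iff (ds : List Nat) (hds : ∀ d ∈ ds, d ≤ 9 ∧ goodD d) (a : Int) :
    foldZ a ds = foldId a ds ↔ ∀ d ∈ ds, zval d = (d : Int) := by
  induction ds generalizing a with
  | nil => simp [foldZ, foldId]
  | cons d rest ih =>
    obtain ⟨hd9, hdg⟩ := hds d (by simp)
    have hrest : ∀ x ∈ rest, x ≤ 9 ∧ goodD x := fun x hx => hds x (by simp [hx])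
    by_cases hz : zval d = (d : Int)
    · rw [foldZ_cons, foldId_cons, hz, ih hrest (a * 10 + (d : Int))]
      simp [hz]
    · constructor
      · intro heq
        exfalso
        rw [foldZ_cons, foldId_cons] at heq
        have hne : a * 10 + zval d ≠ a * 10 + (d : Int) := by omega
        exact foldZ_ne rest hrest _ _ hne heq
      · intro hall
        exact absurd (hall d (by simp)) hz

-- A's loop on a list of good/bad digits
theorem checkLoop_map (n : Int) (ds : List Nat) (hds : ∀ d ∈ ds, d ≤ 9) :
    ∀ a : Int, checkLoop n (ds.map Nat.digitChar) a =
      if ds.any (fun d => d == 3 || d == 4 || d == 7) then false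
      else decide (foldZ a ds ≠ n) := by
  induction ds with
  | nil => intro a; simp [checkLoop, foldZ]
  | cons d rest ih =>
    intro a
    have hd9 := hds d (by simp)
    have hrest : ∀ x ∈ rest, x ≤ 9 := fun x hx => hds x (by simp [hx])
    rw [List.map_cons, checkLoop]
    rw [ofStr_digitChar d hd9]
    by_cases hg : goodD d
    · obtain ⟨h3, h4, h7⟩ := hg
      have hmem : (([2, 5, 6, 9] : List Int) ++ ([0, 1, 8] : List Int)).contains (d : Nat) = true := by
        interval_cases d <;> first | (exact absurd rfl (by assumption)) | decide
      have hbad : (d == 3 || d == 4 || d == 7) = false := by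
        simp; omega
      simp only [Option.getD_some, hmem, if_true, List.any_cons, hbad, Bool.false_or]
      rw [ih hrest]
      rfl
    · have hd : d = 3 ∨ d = 4 ∨ d = 7 := by
        unfold goodD at hg; omega
      have hmem : (([2, 5, 6, 9] : List Int) ++ ([0, 1, 8] : List Int)).contains (d : Nat) = false := by
        rcases hd with h | h | h <;> subst h <;> decide
      have hbad : (d == 3 || d == 4 || d == 7) = true := by
        rcases hd with h | h | h <;> subst h <;> decide
      simp only [Option.getD_some, hmem, Bool.false_eq_true, if_false, List.any_cons, hbad,
        Bool.true_or, if_true]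

theorem altAux347 (ds : List Nat) (h : ∀ d ∈ ds, d ≤ 9) :
    ((ds.map Nat.digitChar).map
        (fun c => (PySem.Int.ofStr? (String.ofList [c])).getD 0)).any
        (fun d => d == 3 || d == 4 || d == 7)
      = ds.any (fun d => d == 3 || d == 4 || d == 7) := by
  induction ds with
  | nil => rfl
  | cons d rest ih =>
    have h9 := h d (by simp)
    simp only [List.map_cons, List.any_cons, ih (fun x hx => h x (by simp [hx]))]
    congr 1
    interval_cases d <;> decide

theorem altAux2569 (ds : List Nat) (h : ∀ d ∈ ds, d ≤ 9 ∧ goodD d) :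
    ((ds.map Nat.digitChar).map
        (fun c => (PySem.Int.ofStr? (String.ofList [c])).getD 0)).any
        (fun d => d == 2 || d == 5 || d == 6 || d == 9)
      = ds.any (fun d => decide (zval d ≠ (d : Int))) := by
  induction ds with
  | nil => rfl
  | cons d rest ih =>
    obtain ⟨h9, h3, h4, h7⟩ := h d (by simp)
    simp only [List.map_cons, List.any_cons, ih (fun x hx => h x (by simp [hx]))]
    congr 1
    interval_cases d <;> first | (exact absurd rfl (by assumption)) | decide

-- ===== VERDICT (by name: the statement is the Claim_ definition above) =====
theorem check_spec : Claim_equal_check := by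
  intro n _ hpre
  unfold Spec_check
  set m := n.toNat with hm
  have hn : (m : Int) = n := Int.toNat_of_nonneg hpre
  have hchars := toChars_nonneg n hpre
  have hle := natDigits_le m
  -- reduce A's side
  unfold check
  rw [hchars, checkLoop_map n (natDigits m) hle 0]
  -- reduce B's side (simp zeta-reduces the `let`)
  simp only [check_alt]
  rw [hchars, altAux347 (natDigits m) hle]
  by_cases hbad : ((natDigits m).any fun d => d == 3 || d == 4 || d == 7) = true
  · simp [hbad]
  · rw [Bool.not_eq_true] at hbad
    have hgood : ∀ d ∈ natDigits m, d ≤ 9 ∧ goodD d := by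
      intro d hd
      refine ⟨hle d hd, ?_⟩
      simp only [List.any_eq_false, Bool.or_eq_true, beq_iff_eq, not_or] at hbad
      have := hbad d hd
      unfold goodD
      omega
    rw [hbad]
    simp only [Bool.false_eq_true, if_false]
    rw [altAux2569 (natDigits m) hgood]
    have hid : foldId 0 (natDigits m) = n := by
      rw [natDigits_foldId]
      simp [hn]
    have key : foldZ 0 (natDigits m) = n ↔ ∀ d ∈ natDigits m, zval d = (d : Int) := by
      rw [← hid]; exact foldZ_eq_iff _ hgood 0
    rw [Bool.eq_iff_iff]
    simp only [decide_eq_true_eq, List.any_eq_true, decide_eq_true_eq]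
    constructor
    · intro hne
      by_contra hall
      push Not at hall
      exact hne (key.2 hall)
    · rintro ⟨d, hd, hz⟩ heq
      exact hz (key.1 heq d hd)
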